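-- pv_equiv track=rewrite | github.com/rickimoore/codeChallenges-Python | reverseSliced.py | reverse_slice
-- ===== SOURCE A (Python) =====
-- def reverse_slice(s):
--     reversed = s[::-1]
--     increment = 0
--     count  = len(list(reversed))
--     slices = []
--
--     while count > 0:
--         slices.append(reversed[increment::])
--         increment += 1
--         count -= 1
--
--     return slices
-- ===== SOURCE B (Python) =====
-- def reverse_slice(s):
--     # One pass over s: acc is the reverse of the prefix read so far;
--     # prepending each new acc yields the suffixes of s[::-1], longest first.
--     acc = ''
--     out = []
--     for c in s:
--         acc = c + acc
--         out.insert(0, acc)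
--     return out
-- ===== Notes on version B (the rewrite author's own statement) =====
-- stated objective: alternative
-- what changed: Instead of reversing the string and taking a fresh slice rev[i:] in every loop iteration, B makes a single pass over s, extending an accumulator (the reversed prefix) by one character and prepending it to the result, so no reversal step and no slicing occur.
import Mathlib
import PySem

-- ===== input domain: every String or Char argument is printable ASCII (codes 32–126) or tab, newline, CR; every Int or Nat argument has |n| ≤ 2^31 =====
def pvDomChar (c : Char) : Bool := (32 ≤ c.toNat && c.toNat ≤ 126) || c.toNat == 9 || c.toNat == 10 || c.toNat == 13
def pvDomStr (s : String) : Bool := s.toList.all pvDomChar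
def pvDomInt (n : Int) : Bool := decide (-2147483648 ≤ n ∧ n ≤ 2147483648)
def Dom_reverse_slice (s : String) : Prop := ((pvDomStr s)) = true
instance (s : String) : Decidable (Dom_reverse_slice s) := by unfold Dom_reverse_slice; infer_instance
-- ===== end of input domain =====

-- B replaces A's reverse-then-reslice loop by a single pass over s with a growing
-- accumulator (objective: alternative decomposition, same cost).

-- ===== PORT A =====
-- while count > 0: slices.append(reversed[increment::]); increment += 1; count -= 1
def reverse_sliceLoop (rev : String) (increment : Int) (count : Nat) (slices : List String) : List String :=
  match count with
  | 0 => slices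
  | Nat.succ n => reverse_sliceLoop rev (increment + 1) n (slices ++ [PySem.Str.slice rev (some increment) none])

def reverse_slice (s : String) : List String :=
  let rev := (PySem.Str.slice? s none none (-1)).getD ""   -- s[::-1]; step -1 ≠ 0, never none
  reverse_sliceLoop rev 0 rev.toList.length []             -- count = len(list(reversed))

-- ===== PORT B =====
-- for c in s: acc = c + acc; out.insert(0, acc)
def reverse_slice_altLoop (cs : List Char) (acc : List Char) (out : List String) : List String :=
  match cs with
  | [] => out
  | c :: rest => reverse_slice_altLoop rest (c :: acc) (String.ofList (c :: acc) :: out)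

def reverse_slice_alt (s : String) : List String :=
  reverse_slice_altLoop s.toList [] []

-- ===== PRECONDITION & SPEC =====
def Spec_reverse_slice (s : String) (out : List String) : Prop := out = reverse_slice_alt s
instance (s : String) (out : List String) : Decidable (Spec_reverse_slice s out) := by unfold Spec_reverse_slice; infer_instance

-- ===== CLAIM (what is proved, stated in full; the proofs are below) =====
def Claim_equal_reverse_slice : Prop := ∀ (s : String), Dom_reverse_slice s → Spec_reverse_slice s (reverse_slice s)

-- ===== LEMMAS AND PROOFS =====

-- A's loop appends the slices rev[inc:], rev[inc+1:], … in order.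
theorem reverse_sliceLoop_eq (rev : String) :
    ∀ (n : Nat) (inc : Int) (slices : List String),
      reverse_sliceLoop rev inc n slices =
        slices ++ (List.range n).map (fun k : Nat => PySem.Str.slice rev (some (inc + (k : Int))) none) := by
  intro n
  induction n with
  | zero => intro inc slices; simp [reverse_sliceLoop]
  | succ m ih =>
      intro inc slices
      rw [reverse_sliceLoop, ih, List.range_succ_eq_map]
      simp [List.map_map, Function.comp, List.append_assoc]
      intro a _
      congr 2
      ring

-- B's loop prepends the reversed prefixes, longest first.
theorem reverse_slice_altLoop_eq :
    ∀ (cs acc : List Char) (out : List String),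
      reverse_slice_altLoop cs acc out =
        ((List.range cs.length).reverse.map
          (fun k => String.ofList ((cs.take (k + 1)).reverse ++ acc))) ++ out := by
  intro cs
  induction cs with
  | nil => intro acc out; simp [reverse_slice_altLoop]
  | cons c rest ih =>
      intro acc out
      rw [reverse_slice_altLoop, ih]
      simp only [List.length_cons, List.range_succ_eq_map, List.reverse_cons, List.map_append,
        List.map_map, List.map_reverse, List.append_assoc]
      simp [Function.comp, List.reverse_cons, List.append_assoc, Nat.succ_eq_add_one]

-- ===== VERDICT (by name: the statement is the Claim_ definition above) =====
theorem reverse_slice_spec : Claim_equal_reverse_slice := by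
  intro s _
  unfold Spec_reverse_slice reverse_slice reverse_slice_alt
  rw [PySem.Str.slice?_none_none_neg_one]
  simp only [Option.getD_some, String.toList_ofList, List.length_reverse]
  rw [reverse_sliceLoop_eq, reverse_slice_altLoop_eq]
  simp only [List.append_nil, List.nil_append, List.map_reverse]
  set L := s.toList with hL
  apply List.ext_getElem
  · simp
  · intro i h1 h2
    simp only [List.getElem_map, List.getElem_range, List.getElem_reverse, List.length_map,
      List.length_range] at *
    have hi : i < L.length := by simpa using h1
    have : PySem.Str.slice (String.ofList L.reverse) (some ((i : Nat) : Int)) none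
        = String.ofList (L.reverse.drop i) := by
      simp [PySem.Str.slice, PySem.Chars.slice_eq_listSlice, PySem.List.slice_from_natCast]
    rw [show ((0 : Int) + (i : Nat) : Int) = ((i : Nat) : Int) by ring, this]
    congr 1
    rw [List.drop_reverse]
    congr 2
    omega
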